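-- pv_equiv track=rewrite | github.com/ddlandim/SoftwareTesting | KissFrame/ncbr2/KissFrame.py | kiss_escape
-- ===== SOURCE A (Python) =====
-- import string
--
-- def valid_hex_digits(A):
--     if(len(A) % 2 != 0):
--       return False
--     for _char in A:
--         if _char not in string.hexdigits:
--             return False
--     return True
--
-- def kiss_escape(A):
--   A=A.lower()
--   if not valid_hex_digits(A):
--     return "HEX_DATA_INVALID"
--   escaped = ""
--   while len(A) > 0:
--     if (A[0] + A[1]) == "c0":
--       escaped += "dbdc"
--     elif (A[0] + A[1]) == "dc":
--       escaped += "dbdd"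
--     else:
--       escaped += (A[0] + A[1])
--     A = A[2:]
--   return escaped
-- ===== SOURCE B (Python) =====
-- import string
--
-- def kiss_escape(A):
--     A = A.lower()
--     if len(A) % 2 != 0 or any(c not in string.hexdigits for c in A):
--         return "HEX_DATA_INVALID"
--     trans = {0xC0: "dbdc", 0xDC: "dbdd"}
--     return "".join(trans.get(b, format(b, "02x")) for b in bytes.fromhex(A))
-- ===== Notes on version B (the rewrite author's own statement) =====
-- stated objective: idiomatic
-- what changed: B parses the validated hex string into integer byte values (bytes.fromhex) and emits each byte via a translation dict with two-digit lowercase hex formatting as fallback, instead of A's while-loop that slices 2-char substrings off the string and compares them as strings.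
import Mathlib
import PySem

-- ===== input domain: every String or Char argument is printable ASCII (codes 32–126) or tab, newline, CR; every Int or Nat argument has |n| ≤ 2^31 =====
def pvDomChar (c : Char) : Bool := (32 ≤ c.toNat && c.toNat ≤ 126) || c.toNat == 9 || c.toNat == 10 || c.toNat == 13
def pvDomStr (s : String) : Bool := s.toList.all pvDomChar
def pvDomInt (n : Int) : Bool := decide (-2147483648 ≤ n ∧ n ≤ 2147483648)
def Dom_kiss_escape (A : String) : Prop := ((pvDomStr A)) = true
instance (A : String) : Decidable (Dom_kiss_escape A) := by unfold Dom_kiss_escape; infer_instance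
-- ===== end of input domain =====

-- B re-implements the escaping by parsing the hex pairs to integer byte values (bytes.fromhex)
-- and re-formatting each byte via a translation dict (objective: idiomatic); return values identical.

-- ===== PORT A =====

-- string.hexdigits
def pvHexdigitsA : List Char :=
  ['0','1','2','3','4','5','6','7','8','9','a','b','c','d','e','f','A','B','C','D','E','F']

-- valid_hex_digits(A): early-return-False loop = all
def valid_hex_digits (A : List Char) : Bool :=
  if A.length % 2 != 0 then false
  else A.all (fun c => pvHexdigitsA.contains c)

-- the while-loop of A; the singleton case is unreachable from kiss_escape (even length)
def kissLoopA : List Char → List Char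
  | c0 :: c1 :: rest =>
      (if [c0, c1] = ['c', '0'] then ['d','b','d','c']
       else if [c0, c1] = ['d', 'c'] then ['d','b','d','d']
       else [c0, c1]) ++ kissLoopA rest
  | _ => []

def kiss_escape (A : String) : String :=
  let l := PySem.Chars.lower A.toList
  if valid_hex_digits l = false then "HEX_DATA_INVALID"
  else String.mk (kissLoopA l)

-- ===== PORT B =====

-- string.hexdigits (B's own membership test)
def pvHexdigitsB : List Char :=
  ['0','1','2','3','4','5','6','7','8','9','a','b','c','d','e','f','A','B','C','D','E','F']

-- digit value of a (lowercase) hex digit, as bytes.fromhex reads it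
def hexVal (c : Char) : Nat :=
  if c.toNat ≤ 57 then c.toNat - 48 else c.toNat - 87

-- bytes.fromhex on a validated lowercase hex string: list of byte values
def fromHex : List Char → List Nat
  | c0 :: c1 :: rest => (16 * hexVal c0 + hexVal c1) :: fromHex rest
  | _ => []

-- format(b, "02x")
def hexChar (n : Nat) : Char := if n ≤ 9 then Char.ofNat (48 + n) else Char.ofNat (87 + n)
def fmt02x (b : Nat) : List Char := [hexChar (b / 16), hexChar (b % 16)]

-- trans = {0xC0: "dbdc", 0xDC: "dbdd"}
def transB : PySem.Dict Nat (List Char) :=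
  (PySem.Dict.empty.insert 192 ['d','b','d','c']).insert 220 ['d','b','d','d']

def kiss_escape_alt (A : String) : String :=
  let l := PySem.Chars.lower A.toList
  if l.length % 2 != 0 || l.any (fun c => !(pvHexdigitsB.contains c)) then "HEX_DATA_INVALID"
  else String.mk (((fromHex l).map (fun b => transB.getD b (fmt02x b))).flatten)

-- ===== PRECONDITION & SPEC =====
def Spec_kiss_escape (A : String) (out : String) : Prop := out = kiss_escape_alt A
instance (A : String) (out : String) : Decidable (Spec_kiss_escape A out) := by unfold Spec_kiss_escape; infer_instance

-- ===== CLAIM (what is proved, stated in full; the proofs are below) =====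
def Claim_equal_kiss_escape : Prop := ∀ (A : String), Dom_kiss_escape A → Spec_kiss_escape A (kiss_escape A)

-- ===== LEMMAS AND PROOFS =====

def hex16 : List Char := ['0','1','2','3','4','5','6','7','8','9','a','b','c','d','e','f']

theorem toNat_ofNat_valid (n : Nat) (h : n.isValidChar) : (Char.ofNat n).toNat = n := by
  simp [Char.ofNat, h, Char.toNat, Char.ofNatAux, -Char.toNat_val]

theorem not_upper_lowerChar (c : Char) : PySem.Chars.isupper (PySem.Chars.lowerChar c) = false := by
  simp only [PySem.Chars.lowerChar]
  split_ifs with hu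
  · simp only [PySem.Chars.isupper, Bool.and_eq_true, decide_eq_true_eq] at hu
    obtain ⟨h1, h2⟩ := hu
    have h90 : c.toNat ≤ 90 := by exact_mod_cast h2
    have hv : (c.toNat + 32).isValidChar := by left; omega
    have ht : (Char.ofNat (c.toNat + 32)).toNat = c.toNat + 32 := toNat_ofNat_valid _ hv
    have h65 : 65 ≤ c.toNat := by exact_mod_cast h1
    simp only [PySem.Chars.isupper, Bool.and_eq_false_iff, decide_eq_false_iff_not]
    right
    intro hle
    have hz : (Char.ofNat (c.toNat + 32)).toNat ≤ 90 := by exact_mod_cast hle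
    omega
  · simpa [PySem.Chars.isupper] using hu

theorem mem22_16 (d : Char) (hm : d ∈ pvHexdigitsA) (hu : PySem.Chars.isupper d = false) :
    d ∈ hex16 := by
  fin_cases hm <;> revert hu <;> decide

-- per-pair agreement of the two loop bodies on lowercase hex digits
theorem pair_eq (c0 c1 : Char) (h0 : c0 ∈ hex16) (h1 : c1 ∈ hex16) :
    (if [c0, c1] = ['c', '0'] then ['d','b','d','c']
     else if [c0, c1] = ['d', 'c'] then ['d','b','d','d']
     else [c0, c1]) = transB.getD (16 * hexVal c0 + hexVal c1) (fmt02x (16 * hexVal c0 + hexVal c1)) := by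
  fin_cases h0 <;> fin_cases h1 <;> decide

theorem loop_eq (l : List Char) (h : ∀ c ∈ l, c ∈ hex16) :
    kissLoopA l = ((fromHex l).map (fun b => transB.getD b (fmt02x b))).flatten := by
  induction l using kissLoopA.induct with
  | case1 c0 c1 rest ih =>
      have h0 := h c0 (by simp)
      have h1 := h c1 (by simp)
      simp only [kissLoopA, fromHex, List.map_cons, List.flatten_cons]
      rw [pair_eq c0 c1 h0 h1, ih (fun c hc => h c (by simp [hc]))]
  | case2 l hne =>
      cases l with
      | nil => simp [kissLoopA, fromHex]
      | cons c t =>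
        cases t with
        | nil => simp [kissLoopA, fromHex]
        | cons d r => exact absurd rfl (hne c d r)

-- A's validity check equals the negation of B's rejection condition
theorem valid_eq (l : List Char) :
    valid_hex_digits l = !(l.length % 2 != 0 || l.any fun c => !(pvHexdigitsB.contains c)) := by
  unfold valid_hex_digits
  by_cases hlen : l.length % 2 != 0
  · simp [hlen]
  · have hlen' : (l.length % 2 != 0) = false := by simpa using hlen
    rw [if_neg hlen, hlen', Bool.false_or]
    show (l.all fun c => pvHexdigitsB.contains c) = _
    rw [List.all_eq_not_any_not]

-- ===== VERDICT (by name: the statement is the Claim_ definition above) =====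
theorem kiss_escape_spec : Claim_equal_kiss_escape := by
  intro A hdom
  unfold Spec_kiss_escape kiss_escape kiss_escape_alt
  have hq := valid_eq (PySem.Chars.lower A.toList)
  by_cases hb : ((PySem.Chars.lower A.toList).length % 2 != 0
      || (PySem.Chars.lower A.toList).any fun c => !(pvHexdigitsB.contains c)) = true
  · rw [hb] at hq
    simp only [Bool.not_true] at hq
    rw [if_pos hq, if_pos hb]
  · have hb' : ((PySem.Chars.lower A.toList).length % 2 != 0
        || (PySem.Chars.lower A.toList).any fun c => !(pvHexdigitsB.contains c)) = false := by
      simpa using hb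
    rw [hb'] at hq
    simp only [Bool.not_false] at hq
    have hq' : ¬ (valid_hex_digits (PySem.Chars.lower A.toList) = false) := by simp [hq]
    rw [if_neg hq', if_neg hb]
    congr 1
    apply loop_eq
    intro c hc
    have hmem : c ∈ pvHexdigitsA := by
      have hany : ((PySem.Chars.lower A.toList).any fun c => !(pvHexdigitsB.contains c)) = false :=
        (Bool.or_eq_false_iff.mp hb').2
      rw [List.any_eq_false] at hany
      have hcont : pvHexdigitsB.contains c = true := by simpa using hany c hc
      exact List.mem_of_elem_eq_true hcont
    have hlow : PySem.Chars.isupper c = false := by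
      rw [PySem.Chars.lower, List.mem_map] at hc
      obtain ⟨d, _, hd⟩ := hc
      rw [← hd]; exact not_upper_lowerChar d
    exact mem22_16 c hmem hlow
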